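-- pv_equiv track=rewrite | github.com/akimi-yano/algorithm | gcj_w/2021/gcj_w1.py | helper
-- ===== SOURCE A (Python) =====
-- from collections import Counter
--
-- def helper(arr):
--     counts = Counter(arr)
--     c = 1
--     ans = 0
--     for q in counts.values():
--         ans += c * q
--         c += 1
--     return ans
-- ===== SOURCE B (Python) =====
-- def helper(arr):
--     # Single pass: assign each value its first-occurrence rank and accumulate
--     # the rank for every element (same value as weighting distinct counts).
--     rank = {}
--     next_rank = 1
--     ans = 0
--     for x in arr:
--         r = rank.get(x)
--         if r is None:
--             r = next_rank
--             rank[x] = r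
--             next_rank += 1
--         ans += r
--     return ans
-- ===== Notes on version B (the rewrite author's own statement) =====
-- stated objective: alternative
-- what changed: Replaces the two-phase build-Counter-then-weight-its-values loop by a single pass that assigns each value its first-occurrence rank and adds that rank per element.
import Mathlib
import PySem

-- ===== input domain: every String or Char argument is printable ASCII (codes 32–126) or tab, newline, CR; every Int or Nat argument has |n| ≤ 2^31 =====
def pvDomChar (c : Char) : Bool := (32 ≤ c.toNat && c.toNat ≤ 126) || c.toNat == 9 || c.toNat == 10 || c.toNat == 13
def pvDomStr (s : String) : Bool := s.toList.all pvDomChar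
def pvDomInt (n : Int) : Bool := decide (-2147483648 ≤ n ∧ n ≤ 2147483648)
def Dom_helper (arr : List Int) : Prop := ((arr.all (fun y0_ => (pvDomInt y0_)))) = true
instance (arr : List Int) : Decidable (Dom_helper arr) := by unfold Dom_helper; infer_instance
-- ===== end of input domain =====

-- B is a single pass with a first-occurrence-rank dict instead of A's
-- build-Counter-then-weight-the-values two-phase loop (objective: alternative).

-- ===== PORT A =====
-- counts = Counter(arr); then for q in counts.values(): ans += c*q; c += 1
def helper (arr : List Int) : Int :=
  let counts := PySem.Dict.counter arr
  (counts.values.foldl (fun (p : Int × Int) q => (p.1 + 1, p.2 + p.1 * q)) (1, 0)).2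

-- ===== PORT B =====
-- rank = {}; next_rank = 1; ans = 0; per element: look up / assign rank, add it
def helper_alt (arr : List Int) : Int :=
  (arr.foldl
    (fun (st : PySem.Dict Int Int × Int × Int) x =>
      match st.1.get? x with
      | some r => (st.1, st.2.1, st.2.2 + r)
      | none   => (st.1.insert x st.2.1, st.2.1 + 1, st.2.2 + st.2.1))
    (PySem.Dict.empty, 1, 0)).2.2

-- ===== PRECONDITION & SPEC =====
def Spec_helper (arr : List Int) (out : Int) : Prop := out = helper_alt arr
instance (arr : List Int) (out : Int) : Decidable (Spec_helper arr out) := by unfold Spec_helper; infer_instance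

-- ===== CLAIM (what is proved, stated in full; the proofs are below) =====
def Claim_equal_helper : Prop := ∀ (arr : List Int), Dom_helper arr → Spec_helper arr (helper arr)

-- ===== LEMMAS AND PROOFS =====

-- weighted sum of l with weights c, c+1, …
def wsum : List Int → Int → Int
  | [], _ => 0
  | q :: l, c => c * q + wsum l (c + 1)

lemma foldA (l : List Int) (c a : Int) :
    l.foldl (fun (p : Int × Int) q => (p.1 + 1, p.2 + p.1 * q)) (c, a)
      = (c + l.length, a + wsum l c) := by
  induction l generalizing c a with
  | nil => simp [wsum]
  | cons q l ih => simp [List.foldl, wsum, ih]; constructor <;> ring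

lemma wsum_congr (s : List Int) (f g : Int → Int) (c : Int)
    (h : ∀ k ∈ s, f k = g k) : wsum (s.map f) c = wsum (s.map g) c := by
  induction s generalizing c with
  | nil => rfl
  | cons k s ih =>
    simp only [List.map, wsum, h k (by simp)]
    rw [ih (c + 1) (fun y hy => h y (List.mem_cons_of_mem _ hy))]

lemma wsum_append_singleton (s : List Int) (q c : Int) :
    wsum (s ++ [q]) c = wsum s c + (c + s.length) * q := by
  induction s generalizing c with
  | nil => simp [wsum]
  | cons k s ih => simp [wsum, ih]; ring

lemma wsum_map_add_ite (s : List Int) (x : Int) (f : Int → Int) (c : Int)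
    (hnd : s.Nodup) (hx : x ∈ s) :
    wsum (s.map fun k => f k + if k = x then 1 else 0) c
      = wsum (s.map f) c + (c + s.idxOf x) := by
  induction s generalizing c with
  | nil => cases hx
  | cons k s ih =>
    rcases List.nodup_cons.mp hnd with ⟨hk, hnd'⟩
    by_cases hkx : k = x
    · subst hkx
      simp only [List.map, wsum, List.idxOf_cons_self]
      rw [wsum_congr s (fun j => f j + if j = k then 1 else 0) f (c + 1)
            (fun y hy => by
              simp only [if_neg (show ¬ y = k from fun h => hk (by rwa [h] at hy)), add_zero])]
      push_cast; ring
    · have hx' : x ∈ s := by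
        cases List.mem_cons.mp hx with
        | inl h => exact absurd h.symm hkx
        | inr h => exact h
      simp only [List.map, wsum, if_neg hkx]
      rw [ih (c + 1) hnd' hx', List.idxOf_cons_ne _ hkx]
      push_cast; ring

-- the first-occurrence rank dict: value ↦ its 1-based rank, as an items list
def rdItems : List Int → Int → List (Int × Int)
  | [], _ => []
  | k :: s, n => (k, n) :: rdItems s (n + 1)

def rd (s : List Int) : PySem.Dict Int Int := PySem.Dict.mk (rdItems s 1)

lemma rdItems_append (s : List Int) (x n : Int) :
    rdItems (s ++ [x]) n = rdItems s n ++ [(x, n + s.length)] := by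
  induction s generalizing n with
  | nil => simp [rdItems]
  | cons k s ih =>
    simp only [List.cons_append, rdItems, ih, List.length_cons]
    have h : n + 1 + (s.length : Int) = n + ((s.length + 1 : Nat) : Int) := by push_cast; ring
    rw [h]

lemma get?_rdItems_of_not_mem (s : List Int) (n x : Int) (hx : x ∉ s) :
    (PySem.Dict.mk (rdItems s n)).get? x = none := by
  induction s generalizing n with
  | nil => rfl
  | cons k s ih =>
    rw [rdItems, PySem.Dict.get?_mk_cons]
    have hkx : ¬ (k == x) = true := by simp; rintro rfl; exact hx (by simp)
    simp only [if_neg hkx]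
    exact ih (n + 1) (fun h => hx (by simp [h]))

lemma get?_rdItems_of_mem (s : List Int) (n x : Int) (hx : x ∈ s) :
    (PySem.Dict.mk (rdItems s n)).get? x = some (n + s.idxOf x) := by
  induction s generalizing n with
  | nil => cases hx
  | cons k s ih =>
    rw [rdItems, PySem.Dict.get?_mk_cons]
    by_cases hkx : k = x
    · subst hkx; simp
    · have hx' : x ∈ s := by
        cases List.mem_cons.mp hx with
        | inl h => exact absurd h.symm hkx
        | inr h => exact h
      have hne : ¬ (k == x) = true := by simpa using hkx
      rw [if_neg hne, ih (n + 1) hx', List.idxOf_cons_ne _ hkx]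
      push_cast; ring_nf

-- B's loop invariant: after processing arr the state is (rank dict of the
-- distinct values, next rank, weighted count sum = A's answer over arr)
lemma B_inv (arr : List Int) :
    arr.foldl
      (fun (st : PySem.Dict Int Int × Int × Int) x =>
        match st.1.get? x with
        | some r => (st.1, st.2.1, st.2.2 + r)
        | none   => (st.1.insert x st.2.1, st.2.1 + 1, st.2.2 + st.2.1))
      (PySem.Dict.empty, 1, 0)
    = (rd (PySem.Set.ofList arr),
       ((PySem.Set.ofList arr).length : Int) + 1,
       wsum ((PySem.Set.ofList arr).map fun k => (arr.count k : Int)) 1) := by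
  induction arr using List.reverseRecOn with
  | nil => rfl
  | append_singleton arr x ih =>
    rw [List.foldl_append, ih]
    have hset : PySem.Set.ofList (arr ++ [x]) = PySem.Set.add (PySem.Set.ofList arr) x := by
      rw [PySem.Set.ofList_eq_foldl, PySem.Set.ofList_eq_foldl, List.foldl_append]; rfl
    have hnd : (PySem.Set.ofList arr).Nodup := PySem.Set.nodup_ofList arr
    by_cases hmem : x ∈ arr
    · have hmemS : x ∈ PySem.Set.ofList arr := (PySem.Set.mem_ofList arr x).mpr hmem
      have hadd : PySem.Set.add (PySem.Set.ofList arr) x = PySem.Set.ofList arr := by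
        simp [PySem.Set.add, PySem.Set.contains, hmemS]
      rw [hset, hadd]
      have hget : (rd (PySem.Set.ofList arr)).get? x
          = some ((1 : Int) + ((PySem.Set.ofList arr).idxOf x : Int)) :=
        get?_rdItems_of_mem _ _ _ hmemS
      simp only [List.foldl, hget]
      refine Prod.ext rfl (Prod.ext rfl ?_)
      have hcnt : ∀ k ∈ PySem.Set.ofList arr,
          ((arr ++ [x]).count k : Int) = (arr.count k : Int) + if k = x then 1 else 0 := by
        intro k _
        rw [List.count_append]
        by_cases h : k = x
        · simp [h]
        · simp [h, show ¬ x = k from fun hh => h hh.symm]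
      show wsum _ 1 + _ = wsum _ 1
      rw [wsum_congr _ _ _ 1 hcnt,
          wsum_map_add_ite _ x (fun k => (arr.count k : Int)) 1 hnd hmemS]
    · have hmemS : x ∉ PySem.Set.ofList arr := fun h => hmem ((PySem.Set.mem_ofList arr x).mp h)
      have hadd : PySem.Set.add (PySem.Set.ofList arr) x = PySem.Set.ofList arr ++ [x] := by
        simp [PySem.Set.add, PySem.Set.contains, hmemS]
      rw [hset, hadd]
      have hget : (rd (PySem.Set.ofList arr)).get? x = none :=
        get?_rdItems_of_not_mem _ _ _ hmemS
      simp only [List.foldl, hget]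
      have hins : (rd (PySem.Set.ofList arr)).insert x (((PySem.Set.ofList arr).length : Int) + 1)
          = rd (PySem.Set.ofList arr ++ [x]) := by
        have hc : (rd (PySem.Set.ofList arr)).contains x = false := by
          rw [PySem.Dict.contains_eq_isSome_get?, hget]; rfl
        apply PySem.Dict.ext
        rw [PySem.Dict.items_insert_of_not_contains _ _ hc]
        show (rdItems (PySem.Set.ofList arr) 1) ++ _ = rdItems (PySem.Set.ofList arr ++ [x]) 1
        rw [rdItems_append]
        simp [add_comm]
      refine Prod.ext hins (Prod.ext ?_ ?_)
      · show ((PySem.Set.ofList arr).length : Int) + 1 + 1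
            = ((PySem.Set.ofList arr ++ [x]).length : Int) + 1
        simp only [List.length_append, List.length_cons, List.length_nil]; push_cast; ring
      · show wsum _ 1 + (((PySem.Set.ofList arr).length : Int) + 1)
            = wsum ((PySem.Set.ofList arr ++ [x]).map fun k => ((arr ++ [x]).count k : Int)) 1
        rw [List.map_append, List.map_singleton, wsum_append_singleton]
        have h1 : ((arr ++ [x]).count x : Int) = 1 := by
          rw [List.count_append]; simp [List.count_eq_zero_of_not_mem hmem]
        have h2 : wsum ((PySem.Set.ofList arr).map fun k => ((arr ++ [x]).count k : Int)) 1
            = wsum ((PySem.Set.ofList arr).map fun k => (arr.count k : Int)) 1 := by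
          apply wsum_congr
          intro k hk
          have hkx : k ≠ x := fun h => hmemS (h ▸ hk)
          rw [List.count_append]
          simp [show ¬ x = k from fun hh => hkx hh.symm]
        rw [h1, h2]; simp only [List.length_map]; ring

-- A's result is the same weighted sum over the distinct values' counts
lemma A_eq_wsum (arr : List Int) :
    helper arr = wsum ((PySem.Set.ofList arr).map fun k => (arr.count k : Int)) 1 := by
  have hv : (PySem.Dict.counter arr).values
      = (PySem.Set.ofList arr).map fun k => (arr.count k : Int) := by
    show (PySem.Dict.counter arr).items.map (·.2) = _
    rw [PySem.Dict.items_counter]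
    simp [List.map_map, Function.comp]
  show ((PySem.Dict.counter arr).values.foldl
      (fun (p : Int × Int) q => (p.1 + 1, p.2 + p.1 * q)) (1, 0)).2 = _
  rw [hv, foldA]; simp

-- ===== VERDICT (by name: the statement is the Claim_ definition above) =====
theorem helper_spec : Claim_equal_helper := by
  intro arr _
  show helper arr = helper_alt arr
  rw [A_eq_wsum]
  unfold helper_alt
  rw [B_inv]
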